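-- pv_equiv track=rewrite | github.com/CodeRudder/game-portal | fix_p2_auto.py | find_broken_import_end
-- ===== SOURCE A (Python) =====
-- def find_broken_import_end(lines):
--     """Find where broken import lines end in p2 file."""
--     i = 0
--     while i < len(lines):
--         s = lines[i].strip()
--         if s.startswith('import ') and not s.endswith(';'):
--             # This is a broken import - skip it
--             i += 1
--         elif s == '' and i > 0 and any(lines[j].strip().startswith('import ') and not lines[j].strip().endswith(';') for j in range(max(0, i-5), i)):
--             # Empty line after broken import
--             i += 1
--         else:
--             break
--     return i
-- ===== SOURCE B (Python) =====
-- def find_broken_import_end(lines):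
--     """Find where broken import lines end in p2 file."""
--     last_broken = None
--     for i, line in enumerate(lines):
--         s = line.strip()
--         if s.startswith('import ') and not s.endswith(';'):
--             last_broken = i
--         elif s == '' and last_broken is not None and i - last_broken <= 5:
--             pass
--         else:
--             return i
--     return len(lines)
-- ===== Notes on version B (the rewrite author's own statement) =====
-- stated objective: simpler
-- what changed: Replaces the backward any() rescan of the previous five lines (and the i>0 guard) by a single running last_broken index maintained forward, and the while loop by a for/enumerate loop with early return.
import Mathlib
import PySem

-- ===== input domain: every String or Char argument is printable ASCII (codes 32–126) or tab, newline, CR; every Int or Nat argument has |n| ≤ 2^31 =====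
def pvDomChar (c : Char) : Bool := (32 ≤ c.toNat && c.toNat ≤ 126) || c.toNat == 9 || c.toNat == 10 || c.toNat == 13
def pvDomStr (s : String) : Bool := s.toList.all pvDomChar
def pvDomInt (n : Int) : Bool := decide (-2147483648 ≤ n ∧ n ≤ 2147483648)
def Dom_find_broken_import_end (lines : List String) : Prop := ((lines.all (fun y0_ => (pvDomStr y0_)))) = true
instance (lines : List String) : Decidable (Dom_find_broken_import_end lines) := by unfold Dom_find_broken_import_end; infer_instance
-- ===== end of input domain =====

-- B replaces A's backward any() rescan of the previous five lines by a running
-- last-broken-import index maintained forward (objective: simpler).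

-- ===== PORT A =====
def find_broken_import_end_go (lines : List String) (i : Nat) : Nat :=
  if h : i < lines.length then
    let s := PySem.Str.strip lines[i]
    if PySem.Str.startswith s "import " && !PySem.Str.endswith s ";" then
      find_broken_import_end_go lines (i + 1)
    else if s == "" && decide (0 < i) &&
        ((PySem.List.pyRange (max 0 ((i : Int) - 5)) (i : Int) 1).any (fun j =>
          let t := PySem.Str.strip (PySem.List.pyGetD lines j "")
          PySem.Str.startswith t "import " && !PySem.Str.endswith t ";")) then
      find_broken_import_end_go lines (i + 1)
    else i
  else i
termination_by lines.length - i

def find_broken_import_end (lines : List String) : Int :=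
  (find_broken_import_end_go lines 0 : Int)

-- ===== PORT B =====
def find_broken_import_end_alt_go (i : Nat) (last : Option Nat) : List String → Nat
  | [] => i
  | line :: rest =>
    let s := PySem.Str.strip line
    if PySem.Str.startswith s "import " && !PySem.Str.endswith s ";" then
      find_broken_import_end_alt_go (i + 1) (some i) rest
    else if s == "" && (match last with
        | some lb => decide (i - lb ≤ 5)
        | none => false) then
      find_broken_import_end_alt_go (i + 1) last rest
    else i

def find_broken_import_end_alt (lines : List String) : Int :=
  (find_broken_import_end_alt_go 0 none lines : Int)

-- ===== PRECONDITION & SPEC =====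
def Spec_find_broken_import_end (lines : List String) (out : Int) : Prop := out = find_broken_import_end_alt lines
instance (lines : List String) (out : Int) : Decidable (Spec_find_broken_import_end lines out) := by unfold Spec_find_broken_import_end; infer_instance

-- ===== CLAIM (what is proved, stated in full; the proofs are below) =====
def Claim_equal_find_broken_import_end : Prop := ∀ (lines : List String), Dom_find_broken_import_end lines → Spec_find_broken_import_end lines (find_broken_import_end lines)

-- ===== LEMMAS AND PROOFS =====

-- "line j of `lines` is a broken import" (proof-side helper)
def pvBrk (s : String) : Bool :=
  PySem.Str.startswith (PySem.Str.strip s) "import " && !PySem.Str.endswith (PySem.Str.strip s) ";"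

-- invariant: `last` is the index of the most recent broken-import line before i (if any)
def LastSpec (lines : List String) (i : Nat) (last : Option Nat) : Prop :=
  match last with
  | none => ∀ j, j < i → pvBrk (lines.getD j "") = false
  | some lb => lb < i ∧ pvBrk (lines.getD lb "") = true ∧
      ∀ j, lb < j → j < i → pvBrk (lines.getD j "") = false

theorem window_eq (lines : List String) (i : Nat) (last : Option Nat)
    (hinv : LastSpec lines i last) :
    ((PySem.List.pyRange (max 0 ((i : Int) - 5)) (i : Int) 1).any (fun j =>
        let t := PySem.Str.strip (PySem.List.pyGetD lines j "")
        PySem.Str.startswith t "import " && !PySem.Str.endswith t ";"))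
      = (match last with
        | some lb => decide (i - lb ≤ 5)
        | none => false) := by
  have hchar : ∀ j : Int, 0 ≤ j → ((fun j =>
      let t := PySem.Str.strip (PySem.List.pyGetD lines j "")
      PySem.Str.startswith t "import " && !PySem.Str.endswith t ";") j)
      = pvBrk (lines.getD j.toNat "") := by
    intro j hj
    have hg : PySem.List.pyGetD lines j "" = lines.getD j.toNat "" := by
      rw [show j = ((j.toNat : Nat) : Int) by omega, PySem.List.pyGetD_natCast]; simp [max_eq_left hj]
    simp [pvBrk, hg]
  rcases last with _ | lb
  · -- no broken line before i: every window element is non-broken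
    simp only [LastSpec] at hinv
    show _ = false
    rw [List.any_eq_false]
    intro j hj
    have hmem := (PySem.List.mem_pyRange_one).1 hj
    have h0 : 0 ≤ j := le_trans (le_max_left _ _) hmem.1
    have hji : j.toNat < i := by omega
    simp only [hchar j h0, hinv _ hji, Bool.false_eq_true, not_false_eq_true]
  · simp only [LastSpec] at hinv
    obtain ⟨hlt, hbrk, hafter⟩ := hinv
    show _ = decide (i - lb ≤ 5)
    by_cases hle : i - lb ≤ 5
    · -- lb lies in the window, so any = true
      rw [decide_eq_true hle, List.any_eq_true]
      refine ⟨(lb : Int), ?_, ?_⟩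
      · rw [PySem.List.mem_pyRange_one]; omega
      · simp only [hchar (lb : Int) (by omega)]
        simpa using hbrk
    · -- window lies strictly after lb, so every element is non-broken
      rw [decide_eq_false hle, List.any_eq_false]
      intro j hj
      have hmem := (PySem.List.mem_pyRange_one).1 hj
      have h0 : 0 ≤ j := le_trans (le_max_left _ _) hmem.1
      have h1 : lb < j.toNat := by omega
      have h2 : j.toNat < i := by omega
      simp only [hchar j h0, hafter _ h1 h2, Bool.false_eq_true, not_false_eq_true]

theorem go_eq (lines : List String) (i : Nat) (last : Option Nat)
    (hinv : LastSpec lines i last) :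
    find_broken_import_end_go lines i = find_broken_import_end_alt_go i last (lines.drop i) := by
  by_cases h : i < lines.length
  · have hdrop : lines.drop i = lines[i] :: lines.drop (i + 1) :=
      List.drop_eq_getElem_cons h
    rw [find_broken_import_end_go, dif_pos h, hdrop]
    simp only [find_broken_import_end_alt_go]
    have hgetD : lines.getD i "" = lines[i] := List.getD_eq_getElem lines "" h
    by_cases hb : (PySem.Str.startswith (PySem.Str.strip lines[i]) "import "
        && !PySem.Str.endswith (PySem.Str.strip lines[i]) ";") = true
    · simp only [hb, if_true]
      apply go_eq
      refine ⟨Nat.lt_succ_self i, ?_, ?_⟩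
      · rw [hgetD]; exact hb
      · intro j hj1 hj2; omega
    · have hbf : (PySem.Str.startswith (PySem.Str.strip lines[i]) "import "
          && !PySem.Str.endswith (PySem.Str.strip lines[i]) ";") = false :=
        Bool.eq_false_iff.mpr hb
      simp only [hbf, Bool.false_eq_true, if_false]
      rw [window_eq lines i last hinv]
      have hnb : pvBrk (lines.getD i "") = false := by
        rw [hgetD]; simpa [pvBrk] using hbf
      rcases last with _ | lb
      · simp only [Bool.and_false, Bool.false_eq_true, if_false]
      · obtain ⟨hlt, hbrk, hafter⟩ := hinv
        have hi0 : decide (0 < i) = true := decide_eq_true (by omega)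
        simp only [hi0, Bool.and_true]
        by_cases hc : ((PySem.Str.strip lines[i] == "") && decide (i - lb ≤ 5)) = true
        · simp only [hc, if_true]
          apply go_eq
          refine ⟨by omega, hbrk, ?_⟩
          intro j hj1 hj2
          rcases Nat.lt_succ_iff_lt_or_eq.mp hj2 with hj' | hj'
          · exact hafter _ hj1 hj'
          · subst hj'; exact hnb
        · have hcf := Bool.eq_false_iff.mpr hc
          simp only [hcf, Bool.false_eq_true, if_false]
  · rw [find_broken_import_end_go, dif_neg h,
        List.drop_eq_nil_of_le (by omega), find_broken_import_end_alt_go]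
termination_by lines.length - i

-- ===== VERDICT (by name: the statement is the Claim_ definition above) =====
theorem find_broken_import_end_spec : Claim_equal_find_broken_import_end := by
  intro lines _
  unfold Spec_find_broken_import_end find_broken_import_end find_broken_import_end_alt
  have h := go_eq lines 0 none (by intro j hj; omega)
  rw [h]; rfl
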